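-- pv_equiv track=rewrite | github.com/Tee2409/Algorithm_Autumn_moves_2021 | Data structure and algorithm/笔试汇总/美团.py | isChange
-- ===== SOURCE A (Python) =====
-- def isChange(str1, str2):
--     min_len = min(len(str1), len(str2))
--     for i in range(min_len):
--         if str1[i]>str2[i]:
--             return 0
--         elif str1[i]<str2[i]:
--             return 1
--     if len(str1) <= len(str2):
--         return 0
--     else:
--         return 1
-- ===== SOURCE B (Python) =====
-- def isChange(str1, str2):
--     if str1.startswith(str2) or str2.startswith(str1):
--         return 0 if len(str1) <= len(str2) else 1
--     return 0 if str1 > str2 else 1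
-- ===== Notes on version B (the rewrite author's own statement) =====
-- stated objective: simpler
-- what changed: The explicit index loop over the common prefix is replaced by a prefix test plus Python's built-in lexicographic string comparison, reproducing A's tie-break (prefix case by length, otherwise by first differing character).
import Mathlib
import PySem

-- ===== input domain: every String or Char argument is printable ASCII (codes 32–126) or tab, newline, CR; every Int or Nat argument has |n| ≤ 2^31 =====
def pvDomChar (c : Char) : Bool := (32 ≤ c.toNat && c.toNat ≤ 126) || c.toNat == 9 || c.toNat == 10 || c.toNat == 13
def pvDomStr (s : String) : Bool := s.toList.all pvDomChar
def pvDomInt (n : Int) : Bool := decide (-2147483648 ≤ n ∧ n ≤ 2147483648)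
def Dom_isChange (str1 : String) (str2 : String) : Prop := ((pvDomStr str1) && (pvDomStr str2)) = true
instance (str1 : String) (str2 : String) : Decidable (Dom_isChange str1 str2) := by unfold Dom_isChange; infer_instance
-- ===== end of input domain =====

-- B replaces A's explicit char-by-char index loop with a prefix test plus the built-in
-- lexicographic comparison (objective: simpler).

-- ===== PORT A =====
-- A's for-loop over range(min(len,len)) comparing str1[i] with str2[i]: the obvious
-- structural recursion over both character lists; 'some r' = an early return from the loop.
def isChangeLoop : List Char → List Char → Option Int
  | c1 :: t1, c2 :: t2 =>
    if c1 > c2 then some 0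
    else if c1 < c2 then some 1
    else isChangeLoop t1 t2
  | _, _ => none

def isChange (str1 : String) (str2 : String) : Int :=
  match isChangeLoop str1.toList str2.toList with
  | some r => r
  | none => if str1.toList.length ≤ str2.toList.length then 0 else 1

-- ===== PORT B =====
-- String '<' in Lean is lexicographic on the character list, exact for Python's '>' here.
def isChange_alt (str1 : String) (str2 : String) : Int :=
  if str2.toList.isPrefixOf str1.toList || str1.toList.isPrefixOf str2.toList then
    if str1.toList.length ≤ str2.toList.length then 0 else 1
  else
    if str2 < str1 then 0 else 1

-- ===== PRECONDITION & SPEC =====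
def Spec_isChange (str1 : String) (str2 : String) (out : Int) : Prop := out = isChange_alt str1 str2
instance (str1 : String) (str2 : String) (out : Int) : Decidable (Spec_isChange str1 str2 out) := by unfold Spec_isChange; infer_instance

-- ===== CLAIM (what is proved, stated in full; the proofs are below) =====
def Claim_equal_isChange : Prop := ∀ (str1 : String) (str2 : String), Dom_isChange str1 str2 → Spec_isChange str1 str2 (isChange str1 str2)

-- ===== LEMMAS AND PROOFS =====
lemma isChange_core (l1 l2 : List Char) :
    (match isChangeLoop l1 l2 with
     | some r => r
     | none => if l1.length ≤ l2.length then (0 : Int) else 1)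
    = if l2.isPrefixOf l1 || l1.isPrefixOf l2 then
        (if l1.length ≤ l2.length then (0 : Int) else 1)
      else
        if l2 < l1 then 0 else 1 := by
  induction l1 generalizing l2 with
  | nil =>
    cases l2 <;> simp [isChangeLoop, List.isPrefixOf]
  | cons a t1 ih =>
    cases l2 with
    | nil => simp [isChangeLoop, List.isPrefixOf]
    | cons b t2 =>
      by_cases hgt : b < a
      · have hne : ¬ (b == a) := by simp; exact (ne_of_lt hgt)
        have hne' : ¬ (a == b) := by simp; exact (ne_of_gt hgt)
        simp [isChangeLoop, hgt, List.isPrefixOf, hne, hne',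
          List.cons_lt_cons_iff, ne_of_lt hgt]
      · by_cases hlt : a < b
        · have hne : ¬ (b == a) := by simp; exact (ne_of_gt hlt)
          have hne' : ¬ (a == b) := by simp; exact (ne_of_lt hlt)
          simp [isChangeLoop, hlt, not_lt_of_gt hlt, List.isPrefixOf, hne, hne',
            List.cons_lt_cons_iff, ne_of_gt hlt]
        · have heq : a = b := le_antisymm (not_lt.mp hgt) (not_lt.mp hlt)
          subst heq
          simpa [isChangeLoop, List.isPrefixOf, List.cons_lt_cons_iff] using ih t2

-- ===== VERDICT (by name: the statement is the Claim_ definition above) =====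
theorem isChange_spec : Claim_equal_isChange := by
  intro str1 str2 _
  unfold Spec_isChange isChange isChange_alt
  have h := isChange_core str1.toList str2.toList
  simpa [String.instLT] using h
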